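-- pv_equiv track=rewrite | github.com/megeagomez/SemanticModelGenerator | models/dax_tokenizer.py | _clean_expression
-- ===== SOURCE A (Python) =====
-- def _clean_expression(expr: str) -> str:
--     """
--     Remove lineageTag and other metadata lines that are appended
--     to measure expressions in some TMDL formats.
--     """
--     lines = expr.split('\n')
--     clean_lines = []
--     for line in lines:
--         stripped = line.strip().lower()
--         if stripped.startswith('lineagetag:'):
--             break
--         if stripped.startswith('changedproperty'):
--             break
--         if stripped.startswith('formatstring:'):
--             break
--         clean_lines.append(line)
--     return '\n'.join(clean_lines)
-- ===== SOURCE B (Python) =====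
-- def _is_meta_line(s: str, p: int) -> bool:
--     while p < len(s) and s[p] in ' \t\r':
--         p += 1
--     t = s[p:].lower()
--     return (t.startswith('lineagetag:') or t.startswith('changedproperty')
--             or t.startswith('formatstring:'))
--
--
-- def _clean_expression(expr: str) -> str:
--     """Single scan over the raw string: find the first metadata line start
--     and slice everything before it; no line list is built."""
--     p = 0
--     while True:
--         if _is_meta_line(expr, p):
--             return '' if p == 0 else expr[:p - 1]
--         nl = expr.find('\n', p)
--         if nl < 0:
--             return expr
--         p = nl + 1
-- ===== Notes on version B (the rewrite author's own statement) =====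
-- stated objective: alternative
-- what changed: B replaces A's split-into-lines/accumulate/join pipeline with a single position scan over the raw string that locates the first metadata line start and returns a slice of everything before it, building no line list.
import Mathlib
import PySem

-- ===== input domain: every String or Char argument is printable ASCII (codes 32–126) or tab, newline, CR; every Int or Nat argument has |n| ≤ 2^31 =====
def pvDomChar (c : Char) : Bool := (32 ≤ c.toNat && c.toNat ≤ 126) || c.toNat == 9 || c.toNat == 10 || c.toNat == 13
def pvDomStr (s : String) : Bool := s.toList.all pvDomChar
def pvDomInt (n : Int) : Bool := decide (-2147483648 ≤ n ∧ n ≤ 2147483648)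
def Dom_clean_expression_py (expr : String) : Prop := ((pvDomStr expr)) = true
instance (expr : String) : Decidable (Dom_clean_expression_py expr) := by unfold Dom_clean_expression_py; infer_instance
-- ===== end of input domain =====

-- B replaces A's split-into-lines/accumulate/join with a single position scan over the raw
-- string that finds the first metadata line start and slices everything before it (objective:
-- alternative; same observable return value).

-- ===== PORT A =====
-- stripped = line.strip().lower(); startswith checks, in A's order
def isMetaA (line : List Char) : Bool :=
  let stripped := PySem.Chars.lower (PySem.Chars.strip line)
  PySem.Chars.startswith stripped "lineagetag:".toList ||
  PySem.Chars.startswith stripped "changedproperty".toList ||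
  PySem.Chars.startswith stripped "formatstring:".toList

-- the for-loop over lines with break: keep lines until the first metadata line
def collectA : List (List Char) → List (List Char)
  | [] => []
  | l :: ls => if isMetaA l then [] else l :: collectA ls

def clean_expression_py (expr : String) : String :=
  let lines := PySem.Chars.splitOn expr.toList ['\n']
  let clean_lines := collectA lines
  String.ofList (PySem.Chars.join ['\n'] clean_lines)

-- ===== PORT B =====
-- _is_meta_line: skip ' ', '\t', '\r', lowercase the rest of the string, test the three prefixes
def isMetaLineB (cs : List Char) : Bool :=
  let t := PySem.Chars.lower (cs.dropWhile (fun c => c == ' ' || c == '\t' || c == '\r'))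
  PySem.Chars.startswith t "lineagetag:".toList ||
  PySem.Chars.startswith t "changedproperty".toList ||
  PySem.Chars.startswith t "formatstring:".toList

-- the while-loop of B: cs is the suffix of the string at the current line start p;
-- returns the offset (within cs) of the first metadata line start, none if there is none.
-- `expr.find('\n', p)` = position of the first '\n' in the suffix (the dropWhile split).
def altScan (cs : List Char) : Option Nat :=
  if isMetaLineB cs then some 0
  else
    match h : cs.dropWhile (fun c => !(c == '\n')) with
    | [] => none
    | _ :: rest => (altScan rest).map (fun q => cs.length - rest.length + q)
termination_by cs.length
decreasing_by
  have h1 := List.length_dropWhile_le (fun c => !(c == '\n')) cs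
  rw [h] at h1
  simp at h1
  omega

def clean_expression_py_alt (expr : String) : String :=
  match altScan expr.toList with
  | none => expr
  | some p => if p = 0 then "" else String.ofList (expr.toList.take (p - 1))

-- ===== PRECONDITION & SPEC =====
def Spec_clean_expression_py (expr : String) (out : String) : Prop := out = clean_expression_py_alt expr
instance (expr : String) (out : String) : Decidable (Spec_clean_expression_py expr out) := by unfold Spec_clean_expression_py; infer_instance

-- ===== CLAIM (what is proved, stated in full; the proofs are below) =====
def Claim_equal_clean_expression_py : Prop := ∀ (expr : String), Dom_clean_expression_py expr → Spec_clean_expression_py expr (clean_expression_py expr)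

-- ===== LEMMAS AND PROOFS =====

-- (first line, remaining lines) of a character list, split at '\n'
def linesSpec : List Char → List Char × List (List Char)
  | [] => ([], [])
  | c :: r =>
    let p := linesSpec r
    if c = '\n' then ([], p.1 :: p.2) else (c :: p.1, p.2)

theorem splitOn_go_eq (fuel : Nat) (l cur : List Char) (acc : List (List Char))
    (h : l.length ≤ fuel) :
    PySem.Chars.splitOn.go ['\n'] fuel l cur acc =
      acc.reverse ++ (cur.reverse ++ (linesSpec l).1) :: (linesSpec l).2 := by
  induction fuel generalizing l cur acc with
  | zero =>
    have : l = [] := by cases l <;> simp_all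
    subst this
    simp [PySem.Chars.splitOn.go, linesSpec]
  | succ n ih =>
    cases l with
    | nil => simp [PySem.Chars.splitOn.go, linesSpec]
    | cons c rest =>
      rw [PySem.Chars.splitOn.go]
      by_cases hc : c = '\n'
      · subst hc
        rw [if_pos (by simp [List.isPrefixOf])]
        rw [ih _ _ _ (by simpa using h)]
        simp [linesSpec]
      · have hpre : (['\n'].isPrefixOf (c :: rest)) = false := by
          simp [List.isPrefixOf]; exact fun hh => absurd hh.symm hc
        simp only [hpre, Bool.false_eq_true, if_false]
        rw [ih _ _ _ (by simpa using h)]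
        simp [linesSpec, hc]

theorem splitOn_eq_linesSpec (cs : List Char) :
    PySem.Chars.splitOn cs ['\n'] = (linesSpec cs).1 :: (linesSpec cs).2 := by
  unfold PySem.Chars.splitOn
  rw [splitOn_go_eq _ _ _ _ (by omega)]
  simp

theorem linesSpec_no_nl (cs : List Char) (h : '\n' ∉ cs) : linesSpec cs = (cs, []) := by
  induction cs with
  | nil => simp [linesSpec]
  | cons c r ih =>
    simp only [List.mem_cons, not_or] at h
    simp [linesSpec, Ne.symm h.1, ih h.2]

theorem linesSpec_append (u r : List Char) (h : '\n' ∉ u) :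
    linesSpec (u ++ '\n' :: r) = (u, (linesSpec r).1 :: (linesSpec r).2) := by
  induction u with
  | nil => simp [linesSpec]
  | cons c t ih =>
    simp only [List.mem_cons, not_or] at h
    simp [linesSpec, Ne.symm h.1, ih h.2]

theorem join_linesSpec (cs : List Char) :
    PySem.Chars.join ['\n'] ((linesSpec cs).1 :: (linesSpec cs).2) = cs := by
  induction cs with
  | nil => simp [linesSpec, PySem.Chars.join_singleton]
  | cons c r ih =>
    by_cases hc : c = '\n'
    · subst hc
      simp only [linesSpec, if_pos]
      rw [PySem.Chars.join_cons_cons]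
      simpa using ih
    · simp only [linesSpec, if_neg hc]
      cases h2 : (linesSpec r).2 with
      | nil =>
        rw [h2] at ih
        simp [PySem.Chars.join_singleton] at ih ⊢
        simp [ih]
      | cons x xs =>
        rw [h2] at ih
        rw [PySem.Chars.join_cons_cons] at ih ⊢
        simp at ih ⊢
        simp [ih]

-- offset of the first metadata line start, computed line-wise
def lineOffset : List (List Char) → Option Nat
  | [] => none
  | l :: ls => if isMetaA l then some 0 else (lineOffset ls).map (fun q => l.length + 1 + q)

theorem join_collectA (lines : List (List Char)) :
    PySem.Chars.join ['\n'] (collectA lines) =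
      match lineOffset lines with
      | none => PySem.Chars.join ['\n'] lines
      | some 0 => []
      | some (p + 1) => (PySem.Chars.join ['\n'] lines).take p := by
  induction lines with
  | nil => simp [collectA, lineOffset]
  | cons l ls ih =>
    by_cases hm : isMetaA l
    · simp [collectA, lineOffset, hm, PySem.Chars.join, List.intercalate]
    · simp only [collectA, lineOffset, hm, Bool.false_eq_true, if_false]
      cases ls with
      | nil => simp [lineOffset, collectA, PySem.Chars.join_singleton]
      | cons x ls' =>
        by_cases hx : isMetaA x
        · -- lineOffset (x::ls') = some 0
          simp only [lineOffset, hx, if_pos, Option.map_some]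
          simp only [collectA, hx, if_pos]
          rw [PySem.Chars.join_singleton, PySem.Chars.join_cons_cons]
          simp
        · have hne : collectA (x :: ls') = x :: collectA ls' := by simp [collectA, hx]
          cases ho : lineOffset (x :: ls') with
          | none =>
            rw [ho] at ih
            simp only [Option.map_none]
            rw [hne] at ih ⊢
            rw [PySem.Chars.join_cons_cons, PySem.Chars.join_cons_cons, ih]
          | some q =>
            cases q with
            | zero => simp [lineOffset, hx] at ho
            | succ q' =>
              rw [ho] at ih
              rw [hne] at ih ⊢
              have ih' : PySem.Chars.join ['\n'] (x :: collectA ls') = List.take q' (PySem.Chars.join ['\n'] (x :: ls')) := by simpa using ih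
              simp only [Option.map_some]
              rw [PySem.Chars.join_cons_cons, PySem.Chars.join_cons_cons, ih']
              rw [show l ++ ['\n'] ++ PySem.Chars.join ['\n'] (x :: ls') = (l ++ ['\n']) ++ PySem.Chars.join ['\n'] (x :: ls') from rfl]
              rw [List.take_append]
              have hadd : (l.length + 1).add q' = l.length + 1 + q' := rfl
              rw [hadd]
              rw [List.take_of_length_le (by simp : (l ++ ['\n']).length ≤ l.length + 1 + q')]
              have h2 : l.length + 1 + q' - (l ++ ['\n']).length = q' := by simp
              rw [h2]

theorem startswith_append_eq (a b m : List Char) (hb : ∀ x, b.head? = some x → x ∉ m) :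
    PySem.Chars.startswith (a ++ b) m = PySem.Chars.startswith a m := by
  rcases hsw : PySem.Chars.startswith a m with _ | _
  · rcases hsw2 : PySem.Chars.startswith (a ++ b) m with _ | _
    · rfl
    · exfalso
      have h1 : m <+: a ++ b := (PySem.Chars.startswith_iff _ _).mp hsw2
      have h2 : ¬ m <+: a := by
        intro hc
        exact absurd ((PySem.Chars.startswith_iff a m).mpr hc) (by simp [hsw])
      have hlen : a.length < m.length := by
        by_contra hl
        exact h2 ((List.isPrefix_append_of_length (by omega)).mp h1)
      have hap : a <+: m := List.prefix_of_prefix_length_le (List.prefix_append a b) h1 (by omega)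
      obtain ⟨m', rfl⟩ := hap
      have hmb : m' <+: b := (List.prefix_append_right_inj a).mp h1
      cases m' with
        | nil => simp at hlen
        | cons x xs =>
          obtain ⟨t, ht⟩ := hmb
          have : b.head? = some x := by rw [← ht]; rfl
          exact hb x this (by simp)
  · have : m <+: a := (PySem.Chars.startswith_iff a m).mp hsw
    exact (PySem.Chars.startswith_iff _ _).mpr (this.trans (List.prefix_append a b))

theorem char_toNat_inj {c d : Char} (h : c.toNat = d.toNat) : c = d :=
  Char.ext (UInt32.toNat_inj.mp h)

theorem char_beq_eq_decide (c d : Char) : (c == d) = decide (c.toNat = d.toNat) := by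
  rcases hb : c == d with _ | _
  · have : c ≠ d := by simpa using hb
    have : c.toNat ≠ d.toNat := fun he => this (char_toNat_inj he)
    simp [this]
  · have : c = d := by simpa using hb
    subst this
    simp

theorem isspace_eq_skip (c : Char) (hd : pvDomChar c = true) (h : c ≠ '\n') :
    PySem.Chars.isspace c = (c == ' ' || c == '\t' || c == '\r') := by
  have hv : ((32 ≤ c.toNat ∧ c.toNat ≤ 126 ∨ c.toNat = 9) ∨ c.toNat = 10) ∨ c.toNat = 13 := by
    simpa [pvDomChar] using hd
  have h10 : c.toNat ≠ 10 := fun he => h (char_toNat_inj he)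
  simp only [PySem.Chars.isspace, char_beq_eq_decide]
  have e1 : (' ' : Char).toNat = 32 := rfl
  have e2 : ('\t' : Char).toNat = 9 := rfl
  have e3 : ('\r' : Char).toNat = 13 := rfl
  rw [e1, e2, e3]
  rw [Bool.eq_iff_iff]
  simp only [Bool.or_eq_true, Bool.and_eq_true, decide_eq_true_eq]
  omega

theorem isspace_lowerChar (c : Char) :
    PySem.Chars.isspace (PySem.Chars.lowerChar c) = PySem.Chars.isspace c := by
  simp only [PySem.Chars.lowerChar]
  rcases hu : PySem.Chars.isupper c with _ | _
  · simp
  · have hc : 65 ≤ c.toNat ∧ c.toNat ≤ 90 := by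
      simp only [PySem.Chars.isupper, Bool.and_eq_true, decide_eq_true_eq, Char.le_def,
        UInt32.le_iff_toNat_le] at hu
      exact hu
    have hval : (Char.ofNat (c.toNat + 32)).toNat = c.toNat + 32 := by
      rw [Char.toNat_ofNat]
      have : (c.toNat + 32).isValidChar := by
        left
        omega
      simp [this]
    simp only [if_pos]
    simp only [PySem.Chars.isspace, hval]
    rw [Bool.eq_iff_iff]
    simp only [Bool.or_eq_true, Bool.and_eq_true, decide_eq_true_eq]
    omega

theorem dropWhile_congr' {α : Type} (p q : α → Bool) (l : List α) (h : ∀ c ∈ l, p c = q c) :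
    l.dropWhile p = l.dropWhile q := by
  induction l with
  | nil => rfl
  | cons x t ih =>
    have hx := h x (by simp)
    simp only [List.dropWhile_cons, hx]
    rcases hq : q x with _ | _
    · simp
    · simpa using ih (fun c hc => h c (by simp [hc]))

theorem dropWhile_skip_append (u r : List Char) :
    (u ++ '\n' :: r).dropWhile (fun c => c == ' ' || c == '\t' || c == '\r') =
      u.dropWhile (fun c => c == ' ' || c == '\t' || c == '\r') ++ '\n' :: r := by
  rw [List.dropWhile_append]
  rcases he : (u.dropWhile (fun c => c == ' ' || c == '\t' || c == '\r')).isEmpty with _ | _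
  · simp
  · simp only [if_pos]
    rw [List.isEmpty_iff] at he
    rw [he]
    simp

theorem rstrip_decomp (v : List Char) :
    ∃ w, v = PySem.Chars.rstrip v ++ w ∧ ∀ c ∈ w, PySem.Chars.isspace c = true := by
  refine ⟨(v.reverse.takeWhile PySem.Chars.isspace).reverse, ?_, ?_⟩
  · conv_lhs => rw [← v.reverse_reverse]
    rw [show PySem.Chars.rstrip v = (v.reverse.dropWhile PySem.Chars.isspace).reverse from rfl]
    rw [← List.reverse_append, List.takeWhile_append_dropWhile]
  · intro c hc
    rw [List.mem_reverse] at hc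
    exact List.mem_takeWhile_imp hc

theorem sw_line (u tail m : List Char)
    (hm : ∀ c ∈ m, PySem.Chars.isspace c = false)
    (hu : ∀ c ∈ u, pvDomChar c = true) (hnl : '\n' ∉ u)
    (ht : tail = [] ∨ ∃ r, tail = '\n' :: r) :
    PySem.Chars.startswith
        (PySem.Chars.lower ((u ++ tail).dropWhile (fun c => c == ' ' || c == '\t' || c == '\r'))) m
      = PySem.Chars.startswith (PySem.Chars.lower (PySem.Chars.strip u)) m := by
  -- left side: pull the tail out
  have hstep1 : (u ++ tail).dropWhile (fun c => c == ' ' || c == '\t' || c == '\r') =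
      u.dropWhile (fun c => c == ' ' || c == '\t' || c == '\r') ++ tail := by
    rcases ht with rfl | ⟨r, rfl⟩
    · simp
    · exact dropWhile_skip_append u r
  rw [hstep1]
  rw [show PySem.Chars.lower (u.dropWhile (fun c => c == ' ' || c == '\t' || c == '\r') ++ tail) =
      PySem.Chars.lower (u.dropWhile (fun c => c == ' ' || c == '\t' || c == '\r')) ++ PySem.Chars.lower tail from List.map_append ..]
  rw [startswith_append_eq _ _ _ ?htl]
  case htl =>
    intro x hx hmem
    rcases ht with rfl | ⟨r, rfl⟩
    · simp [PySem.Chars.lower] at hx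
    · simp only [PySem.Chars.lower, List.map_cons, List.head?_cons, Option.some_inj] at hx
      have : x = '\n' := by rw [← hx]; rfl
      subst this
      have := hm _ hmem
      simp [PySem.Chars.isspace] at this
  -- right side: strip u = rstrip (lstrip u); lstrip u is the same dropWhile
  have hlstrip : PySem.Chars.lstrip u = u.dropWhile (fun c => c == ' ' || c == '\t' || c == '\r') := by
    rw [show PySem.Chars.lstrip u = u.dropWhile PySem.Chars.isspace from rfl]
    exact dropWhile_congr' _ _ u (fun c hc => isspace_eq_skip c (hu c hc) (fun he => hnl (he ▸ hc)))
  rw [show PySem.Chars.strip u = PySem.Chars.rstrip (PySem.Chars.lstrip u) from rfl, hlstrip]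
  set v := u.dropWhile (fun c => c == ' ' || c == '\t' || c == '\r') with hv
  obtain ⟨w, hw, hws⟩ := rstrip_decomp v
  conv_lhs => rw [hw]
  rw [show PySem.Chars.lower (PySem.Chars.rstrip v ++ w) =
      PySem.Chars.lower (PySem.Chars.rstrip v) ++ PySem.Chars.lower w from List.map_append ..]
  rw [startswith_append_eq _ _ _ ?hw2]
  case hw2 =>
    intro x hx hmem
    cases w with
    | nil => simp [PySem.Chars.lower] at hx
    | cons y w' =>
      simp only [PySem.Chars.lower, List.map_cons, List.head?_cons, Option.some_inj] at hx
      have hy : PySem.Chars.isspace y = true := hws y (by simp)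
      have : PySem.Chars.isspace x = true := by
        rw [← hx, isspace_lowerChar]; exact hy
      rw [hm _ hmem] at this
      exact absurd this (by simp)


theorem dropWhile_head_false {α : Type} (p : α → Bool) (l : List α) (d : α) (rest : List α)
    (h : l.dropWhile p = d :: rest) : p d = false := by
  induction l with
  | nil => simp at h
  | cons x t ih =>
    rw [List.dropWhile_cons] at h
    by_cases hp : p x
    · rw [if_pos hp] at h
      exact ih h
    · rw [if_neg hp] at h
      obtain ⟨rfl, -⟩ := List.cons.inj h
      simpa using hp

theorem marker1_nospace : ∀ c ∈ "lineagetag:".toList, PySem.Chars.isspace c = false := by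
  intro c hc
  simp only [show "lineagetag:".toList = ['l','i','n','e','a','g','e','t','a','g',':'] from by
    decide, List.mem_cons] at hc
  rcases hc with rfl|rfl|rfl|rfl|rfl|rfl|rfl|rfl|rfl|rfl|rfl|hc
  all_goals first | rfl | simp at hc

theorem marker2_nospace : ∀ c ∈ "changedproperty".toList, PySem.Chars.isspace c = false := by
  intro c hc
  simp only [show "changedproperty".toList =
    ['c','h','a','n','g','e','d','p','r','o','p','e','r','t','y'] from by decide,
    List.mem_cons] at hc
  rcases hc with rfl|rfl|rfl|rfl|rfl|rfl|rfl|rfl|rfl|rfl|rfl|rfl|rfl|rfl|rfl|hc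
  all_goals first | rfl | simp at hc

theorem marker3_nospace : ∀ c ∈ "formatstring:".toList, PySem.Chars.isspace c = false := by
  intro c hc
  simp only [show "formatstring:".toList =
    ['f','o','r','m','a','t','s','t','r','i','n','g',':'] from by decide,
    List.mem_cons] at hc
  rcases hc with rfl|rfl|rfl|rfl|rfl|rfl|rfl|rfl|rfl|rfl|rfl|rfl|rfl|hc
  all_goals first | rfl | simp at hc

theorem meta_eq (u tail : List Char)
    (hu : ∀ c ∈ u, pvDomChar c = true) (hnl : '\n' ∉ u)
    (ht : tail = [] ∨ ∃ r, tail = '\n' :: r) :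
    isMetaLineB (u ++ tail) = isMetaA u := by
  have h1 := sw_line u tail "lineagetag:".toList marker1_nospace hu hnl ht
  have h2 := sw_line u tail "changedproperty".toList marker2_nospace hu hnl ht
  have h3 := sw_line u tail "formatstring:".toList marker3_nospace hu hnl ht
  simp only [isMetaLineB, isMetaA]
  rw [h1, h2, h3]

theorem altScan_eq_aux (n : Nat) : ∀ (cs : List Char), cs.length ≤ n →
    (∀ c ∈ cs, pvDomChar c = true) →
    altScan cs = lineOffset ((linesSpec cs).1 :: (linesSpec cs).2) := by
  induction n with
  | zero =>
    intro cs hlen hd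
    have : cs = [] := by cases cs <;> simp_all
    subst this
    rw [altScan.eq_def]
    simp [isMetaLineB, isMetaA, linesSpec, lineOffset, PySem.Chars.strip,
      PySem.Chars.lstrip, PySem.Chars.rstrip, PySem.Chars.lower, PySem.Chars.startswith]
  | succ n ih =>
    intro cs hlen hd
    rw [altScan.eq_def]
    by_cases hmem : '\n' ∈ cs
    · -- cs = u ++ '\n' :: rest
      have hne : cs.dropWhile (fun c => !(c == '\n')) ≠ [] := by
        rw [Ne, List.dropWhile_eq_nil_iff]
        intro hall
        have := hall '\n' hmem
        simp at this
      obtain ⟨d, rest, hd2⟩ : ∃ d rest, cs.dropWhile (fun c => !(c == '\n')) = d :: rest := by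
        cases h : cs.dropWhile (fun c => !(c == '\n')) with
        | nil => exact absurd h hne
        | cons d rest => exact ⟨d, rest, rfl⟩
      have hdchar : d = '\n' := by
        have hh := dropWhile_head_false _ _ _ _ hd2
        simpa using hh
      subst hdchar
      have hsplit : cs = cs.takeWhile (fun c => !(c == '\n')) ++ '\n' :: rest := by
        conv_lhs => rw [← List.takeWhile_append_dropWhile (p := fun c => !(c == '\n')) (l := cs)]
        rw [hd2]
      have hu_nl : '\n' ∉ cs.takeWhile (fun c => !(c == '\n')) := by
        intro hc
        have := List.mem_takeWhile_imp hc
        simp at this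
      have hu_dom : ∀ c ∈ cs.takeWhile (fun c => !(c == '\n')), pvDomChar c = true := by
        intro c hc
        exact hd c (by rw [hsplit]; exact List.mem_append_left _ hc)
      have hrest_dom : ∀ c ∈ rest, pvDomChar c = true := by
        intro c hc
        exact hd c (by rw [hsplit]; exact List.mem_append_right _ (by simp [hc]))
      have hlen' : rest.length ≤ n := by
        have := congrArg List.length hsplit
        simp at this
        omega
      have hmeta : isMetaLineB cs = isMetaA (cs.takeWhile (fun c => !(c == '\n'))) := by
        conv_lhs => rw [hsplit]
        exact meta_eq _ _ hu_dom hu_nl (Or.inr ⟨rest, rfl⟩)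
      have hlines : linesSpec cs =
          (cs.takeWhile (fun c => !(c == '\n')), (linesSpec rest).1 :: (linesSpec rest).2) := by
        conv_lhs => rw [hsplit]
        exact linesSpec_append _ _ hu_nl
      have hsub : cs.length - rest.length = (cs.takeWhile (fun c => !(c == '\n'))).length + 1 := by
        have := congrArg List.length hsplit
        simp at this
        omega
      rw [hmeta, hlines]
      simp only [lineOffset]
      by_cases hb : isMetaA (cs.takeWhile (fun c => !(c == '\n')))
      · simp [hb]
      · simp only [hb, Bool.false_eq_true, if_false]
        split
        · rename_i heq
          exact absurd heq hne
        · rename_i head rest' heq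
          rw [hd2] at heq
          obtain ⟨-, rfl⟩ := List.cons.inj heq
          rw [ih rest hlen' hrest_dom, hsub]
          simp [lineOffset]
    · -- no newline: a single line
      have hdw : cs.dropWhile (fun c => !(c == '\n')) = [] := by
        rw [List.dropWhile_eq_nil_iff]
        intro x hx
        simp only [Bool.not_eq_eq_eq_not, Bool.not_true, beq_eq_false_iff_ne, ne_eq]
        exact fun he => hmem (he ▸ hx)
      have hmeta : isMetaLineB cs = isMetaA cs := by
        have := meta_eq cs [] hd hmem (Or.inl rfl)
        simpa using this
      rw [hmeta, linesSpec_no_nl cs hmem]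
      by_cases hb : isMetaA cs
      · simp [lineOffset, hb]
      · simp only [lineOffset, hb, Bool.false_eq_true, if_false, Option.map_none]
        split
        · simp
        · rename_i head rest heq
          rw [hdw] at heq
          simp at heq

theorem altScan_eq (cs : List Char) (hd : ∀ c ∈ cs, pvDomChar c = true) :
    altScan cs = lineOffset ((linesSpec cs).1 :: (linesSpec cs).2) :=
  altScan_eq_aux cs.length cs (le_refl _) hd

-- ===== VERDICT (by name: the statement is the Claim_ definition above) =====
theorem clean_expression_py_spec : Claim_equal_clean_expression_py := by
  intro expr hdom
  unfold Spec_clean_expression_py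
  have hd : ∀ c ∈ expr.toList, pvDomChar c = true := by
    simpa [Dom_clean_expression_py, pvDomStr, List.all_eq_true] using hdom
  show String.ofList (PySem.Chars.join ['\n'] (collectA (PySem.Chars.splitOn expr.toList ['\n']))) = _
  unfold clean_expression_py_alt
  rw [splitOn_eq_linesSpec, join_collectA, altScan_eq _ hd]
  cases hL : lineOffset ((linesSpec expr.toList).1 :: (linesSpec expr.toList).2) with
  | none =>
    simp only
    rw [join_linesSpec]
    exact String.ofList_toList
  | some p =>
    cases p with
    | zero => rfl
    | succ p' =>
      simp only
      rw [join_linesSpec]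
      simp
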